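-- pv_equiv track=rewrite | github.com/Nishant-coder-cpu/Complaint-Routing-System-using-SLM | api.py | compute_route_to
-- ===== SOURCE A (Python) =====
-- from typing import List, Optional
--
-- def compute_route_to(categories: List[str]) -> str:
--     """Map categories to department/authority"""
--     # Priority-based routing (first match wins)
--     routing_rules = [
--         (["Workplace Harassment", "Sexual Harassment", "Abuse of Authority"], "Internal Complaints Committee"),
--         (["Corruption or Bribery", "Fraud"], "Vigilance / Ethics Office"),
--         (["Discrimination or Bias"], "Diversity & Inclusion Office"),
--         (["Safety Hazard"], "Health & Safety Department"),
--         (["Mental Health or Stress"], "Employee Wellness / HR"),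
--         (["Academic Misconduct"], "Academic Affairs / Disciplinary Committee"),
--         (["Infrastructure or Facility Issue", "Service Issue"], "Operations / Facilities Management"),
--         (["HR"], "Human Resources"),
--     ]
--
--     for keywords, department in routing_rules:
--         for cat in categories:
--             if any(keyword.lower() in cat.lower() for keyword in keywords):
--                 return department
--
--     return "Customer Support / General Grievance Cell"
-- ===== SOURCE B (Python) =====
-- from typing import List
--
-- def compute_route_to(categories: List[str]) -> str:
--     """Map categories to department/authority"""
--     routing_rules = [
--         (["Workplace Harassment", "Sexual Harassment", "Abuse of Authority"], "Internal Complaints Committee"),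
--         (["Corruption or Bribery", "Fraud"], "Vigilance / Ethics Office"),
--         (["Discrimination or Bias"], "Diversity & Inclusion Office"),
--         (["Safety Hazard"], "Health & Safety Department"),
--         (["Mental Health or Stress"], "Employee Wellness / HR"),
--         (["Academic Misconduct"], "Academic Affairs / Disciplinary Committee"),
--         (["Infrastructure or Facility Issue", "Service Issue"], "Operations / Facilities Management"),
--         (["HR"], "Human Resources"),
--     ]
--     best = None  # (rule_index, department) with the smallest rule index seen so far
--     for cat in categories:
--         cat_l = cat.lower()
--         hit = None
--         for idx, (keywords, department) in enumerate(routing_rules):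
--             if any(keyword.lower() in cat_l for keyword in keywords):
--                 hit = (idx, department)
--                 break
--         if hit is not None and (best is None or hit[0] < best[0]):
--             best = hit
--     if best is None:
--         return "Customer Support / General Grievance Cell"
--     return best[1]
-- ===== Notes on version B (the rewrite author's own statement) =====
-- stated objective: alternative
-- what changed: B inverts the loop nesting: it makes one pass over categories, computes each category's first matching rule index, and maintains a running minimum-index (index, department) accumulator, returning that department instead of scanning all categories per rule.
import Mathlib
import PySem

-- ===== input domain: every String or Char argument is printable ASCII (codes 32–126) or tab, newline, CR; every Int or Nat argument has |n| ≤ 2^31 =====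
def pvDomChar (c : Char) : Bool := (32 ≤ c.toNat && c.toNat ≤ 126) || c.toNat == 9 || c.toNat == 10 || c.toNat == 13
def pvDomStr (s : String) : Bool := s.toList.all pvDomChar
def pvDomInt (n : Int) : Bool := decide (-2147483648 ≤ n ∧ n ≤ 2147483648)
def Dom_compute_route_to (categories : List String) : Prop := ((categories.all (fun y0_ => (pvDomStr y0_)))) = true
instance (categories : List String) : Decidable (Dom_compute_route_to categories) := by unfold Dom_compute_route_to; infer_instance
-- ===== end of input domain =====

-- B re-implements the routing with categories as the outer loop, keeping the minimum matched rule index; same result, different decomposition.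

-- the shared routing table literal
def pvRules : List (List String × String) :=
  [ (["Workplace Harassment", "Sexual Harassment", "Abuse of Authority"], "Internal Complaints Committee"),
    (["Corruption or Bribery", "Fraud"], "Vigilance / Ethics Office"),
    (["Discrimination or Bias"], "Diversity & Inclusion Office"),
    (["Safety Hazard"], "Health & Safety Department"),
    (["Mental Health or Stress"], "Employee Wellness / HR"),
    (["Academic Misconduct"], "Academic Affairs / Disciplinary Committee"),
    (["Infrastructure or Facility Issue", "Service Issue"], "Operations / Facilities Management"),
    (["HR"], "Human Resources") ]

-- ===== PORT A =====
-- A: outer loop over rules, inner loop over categories; first match returns the department.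
def pvRouteA : List (List String × String) → List String → String
  | [], _ => "Customer Support / General Grievance Cell"
  | (keywords, department) :: rest, categories =>
      if categories.any (fun cat =>
           keywords.any (fun keyword =>
             PySem.Str.isIn (PySem.Str.lower keyword) (PySem.Str.lower cat)))
      then department
      else pvRouteA rest categories

def compute_route_to (categories : List String) : String :=
  pvRouteA pvRules categories

-- ===== PORT B =====
-- B: for one (already lowered) category, the first matching rule's (index, department); `idx` is the enumerate counter.
def pvRuleHit : List (List String × String) → Nat → String → Option (Nat × String)
  | [], _, _ => none
  | (keywords, department) :: rest, idx, cat_l =>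
      if keywords.any (fun keyword => PySem.Str.isIn (PySem.Str.lower keyword) cat_l)
      then some (idx, department)
      else pvRuleHit rest (idx + 1) cat_l

-- B: one step of the outer loop — keep the hit with the strictly smaller rule index.
def pvBStep (rules : List (List String × String)) (best : Option (Nat × String)) (cat : String) :
    Option (Nat × String) :=
  match pvRuleHit rules 0 (PySem.Str.lower cat) with
  | none => best
  | some hit =>
      match best with
      | none => some hit
      | some b => if hit.1 < b.1 then some hit else best

def compute_route_to_alt (categories : List String) : String :=
  match categories.foldl (pvBStep pvRules) none with
  | none => "Customer Support / General Grievance Cell"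
  | some best => best.2

-- ===== PRECONDITION & SPEC =====
def Spec_compute_route_to (categories : List String) (out : String) : Prop := out = compute_route_to_alt categories
instance (categories : List String) (out : String) : Decidable (Spec_compute_route_to categories out) := by unfold Spec_compute_route_to; infer_instance

-- ===== CLAIM (what is proved, stated in full; the proofs are below) =====
def Claim_equal_compute_route_to : Prop := ∀ (categories : List String), Dom_compute_route_to categories → Spec_compute_route_to categories (compute_route_to categories)

-- ===== LEMMAS AND PROOFS =====

def pvShift1 (p : Nat × String) : Nat × String := (p.1 + 1, p.2)

def pvMatch1 (keywords : List String) (cat : String) : Bool :=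
  keywords.any (fun keyword => PySem.Str.isIn (PySem.Str.lower keyword) (PySem.Str.lower cat))

theorem pvRuleHit_shift (rs : List (List String × String)) (i : Nat) (cl : String) :
    pvRuleHit rs i cl = (pvRuleHit rs 0 cl).map (fun p => (p.1 + i, p.2)) := by
  induction rs generalizing i with
  | nil => simp [pvRuleHit]
  | cons r rest ih =>
    obtain ⟨kws, d⟩ := r
    simp only [pvRuleHit]
    split
    · simp
    · rw [ih (i + 1), ih 1]
      cases pvRuleHit rest 0 cl with
      | none => simp
      | some p => simp [Nat.add_assoc, Nat.add_comm 1 i]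

-- the head-rule case split of pvRuleHit
theorem pvRuleHit_cons (kws : List String) (d : String) (rest : List (List String × String)) (cat : String) :
    pvRuleHit ((kws, d) :: rest) 0 (PySem.Str.lower cat)
      = if pvMatch1 kws cat then some (0, d)
        else (pvRuleHit rest 0 (PySem.Str.lower cat)).map pvShift1 := by
  simp only [pvRuleHit, pvMatch1]
  split
  · simp
  · rw [pvRuleHit_shift rest 1]; rfl

theorem foldl_bstep_nil (cats : List String) (acc : Option (Nat × String)) :
    cats.foldl (pvBStep []) acc = acc := by
  induction cats generalizing acc with
  | nil => rfl
  | cons c cs ih => simpa [List.foldl, pvBStep, pvRuleHit] using ih acc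

-- once the accumulator holds index 0, nothing can beat it
theorem foldl_bstep_stay (rs : List (List String × String)) (cats : List String) (e : String) :
    cats.foldl (pvBStep rs) (some (0, e)) = some (0, e) := by
  induction cats with
  | nil => rfl
  | cons c cs ih =>
    simp only [List.foldl]
    have : pvBStep rs (some (0, e)) c = some (0, e) := by
      simp only [pvBStep]
      cases pvRuleHit rs 0 (PySem.Str.lower c) with
      | none => rfl
      | some h => simp
    rw [this, ih]

def pvGoodAcc (d : String) (acc : Option (Nat × String)) : Prop :=
  ∀ e, acc = some (0, e) → e = d

theorem pvGoodAcc_pres (kws : List String) (d : String) (rest : List (List String × String))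
    (acc : Option (Nat × String)) (c : String) (h : pvGoodAcc d acc) :
    pvGoodAcc d (pvBStep ((kws, d) :: rest) acc c) := by
  simp only [pvBStep, pvRuleHit_cons]
  by_cases hm : pvMatch1 kws c = true
  · simp only [hm, if_pos]
    cases acc with
    | none => intro e he; simp at he; exact he.symm
    | some b =>
      simp only
      split
      · intro e he; simp at he; exact he.symm
      · exact h
  · simp only [Bool.not_eq_true] at hm
    simp only [hm, Bool.false_eq_true, if_false]
    cases hr : pvRuleHit rest 0 (PySem.Str.lower c) with
    | none => simpa using h
    | some p =>
      simp only [Option.map_some]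
      cases acc with
      | none => intro e he; simp [pvShift1] at he
      | some b =>
        simp only
        split
        · intro e he; simp [pvShift1] at he
        · exact h

-- if some category matches the head rule, the fold ends at (0, d)
theorem foldl_bstep_reach (kws : List String) (d : String) (rest : List (List String × String)) :
    ∀ (cats : List String) (acc : Option (Nat × String)), pvGoodAcc d acc →
    (∃ c ∈ cats, pvMatch1 kws c = true) →
    cats.foldl (pvBStep ((kws, d) :: rest)) acc = some (0, d) := by
  intro cats
  induction cats with
  | nil => rintro acc _ ⟨c, hc, _⟩; exact absurd hc (List.not_mem_nil)
  | cons c cs ih =>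
    intro acc hgood hex
    by_cases hm : pvMatch1 kws c = true
    · have hstep : pvBStep ((kws, d) :: rest) acc c = some (0, d) := by
        simp only [pvBStep, pvRuleHit_cons, hm, if_pos]
        cases acc with
        | none => rfl
        | some b =>
          simp only
          split
          · rfl
          · rename_i hlt
            have hb1 : b.1 = 0 := by omega
            have := hgood b.2 (by rw [← hb1])
            cases b; simp_all
      simp only [List.foldl, hstep]
      exact foldl_bstep_stay _ cs d
    · obtain ⟨c', hc', hm'⟩ := hex
      rcases List.mem_cons.mp hc' with rfl | hc'
      · exact absurd hm' hm
      · simp only [List.foldl]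
        exact ih _ (pvGoodAcc_pres kws d rest acc c hgood) ⟨c', hc', hm'⟩

-- if no category matches the head rule, dropping the head rule shifts all indices by one
theorem foldl_bstep_shift (kws : List String) (d : String) (rest : List (List String × String)) :
    ∀ (cats : List String) (acc : Option (Nat × String)),
    (∀ c ∈ cats, pvMatch1 kws c = false) →
    cats.foldl (pvBStep ((kws, d) :: rest)) (acc.map pvShift1)
      = (cats.foldl (pvBStep rest) acc).map pvShift1 := by
  intro cats
  induction cats with
  | nil => intro acc _; rfl
  | cons c cs ih =>
    intro acc hno
    have hm : pvMatch1 kws c = false := hno c (List.mem_cons_self)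
    have hstep : pvBStep ((kws, d) :: rest) (acc.map pvShift1) c
        = (pvBStep rest acc c).map pvShift1 := by
      simp only [pvBStep, pvRuleHit_cons, hm, Bool.false_eq_true, if_false]
      cases hr : pvRuleHit rest 0 (PySem.Str.lower c) with
      | none => rfl
      | some p =>
        cases acc with
        | none => rfl
        | some b =>
          simp only [Option.map_some, pvShift1]
          have : p.1 + 1 < b.1 + 1 ↔ p.1 < b.1 := by omega
          split <;> split <;> simp_all [pvShift1]
    simp only [List.foldl, hstep]
    exact ih (pvBStep rest acc c) (fun c' hc' => hno c' (List.mem_cons_of_mem _ hc'))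

theorem route_eq_fold (rs : List (List String × String)) (cats : List String) :
    pvRouteA rs cats
      = (match cats.foldl (pvBStep rs) none with
         | none => "Customer Support / General Grievance Cell"
         | some best => best.2) := by
  induction rs generalizing cats with
  | nil => simp [pvRouteA, foldl_bstep_nil]
  | cons r rest ih =>
    obtain ⟨kws, d⟩ := r
    simp only [pvRouteA]
    by_cases hany : cats.any (fun cat =>
        kws.any (fun keyword =>
          PySem.Str.isIn (PySem.Str.lower keyword) (PySem.Str.lower cat))) = true
    · rw [if_pos hany]
      obtain ⟨c, hc, hm⟩ := List.any_eq_true.mp hany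
      rw [foldl_bstep_reach kws d rest cats none (by intro e he; simp at he)
            ⟨c, hc, hm⟩]
    · rw [if_neg (by simpa using hany)]
      have hno : ∀ c ∈ cats, pvMatch1 kws c = false := by
        intro c hc
        by_contra h
        exact hany (List.any_eq_true.mpr ⟨c, hc, by simpa [pvMatch1] using h⟩)
      have := foldl_bstep_shift kws d rest cats none hno
      simp only [Option.map_none] at this
      rw [this, ih cats]
      cases cats.foldl (pvBStep rest) none with
      | none => rfl
      | some p => rfl

-- ===== VERDICT (by name: the statement is the Claim_ definition above) =====
theorem compute_route_to_spec : Claim_equal_compute_route_to := by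
  intro cats _
  unfold Spec_compute_route_to compute_route_to compute_route_to_alt
  exact route_eq_fold pvRules cats
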